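-- pv_equiv track=rewrite | github.com/SiddharthJiyani/Prototype_AI_for_Bharat | ai-service/rag/retrieval.py | _build_history_text
-- ===== SOURCE A (Python) =====
-- MAX_CONTEXT_MESSAGES = 20        # Hard cap on conversation messages in context
--
-- MAX_HISTORY_CHARS = 8000         # Max chars of history text to include in prompt
--
-- def _build_history_text(chat_history: list, max_msgs: int = None, max_chars: int = None) -> tuple[str, int, bool]:
--     """
--     Build conversation history text from chat_history.
--     Returns (history_text, message_count, context_limit_reached).
--     """
--     if not chat_history:
--         return "", 0, False
--
--     max_msgs = max_msgs or MAX_CONTEXT_MESSAGES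
--     max_chars = max_chars or MAX_HISTORY_CHARS
--
--     total = len(chat_history)
--     # Only include the most recent messages up to the limit
--     recent = chat_history[-max_msgs:]
--
--     parts = []
--     char_count = 0
--     included = 0
--     for msg in recent:
--         role = "User" if msg.get("role") == "user" else "Assistant"
--         content = msg.get("content", "")
--         line = f"{role}: {content}"
--         if char_count + len(line) > max_chars:
--             break
--         parts.append(line)
--         char_count += len(line)
--         included += 1
--
--     history_text = ""
--     if parts:
--         history_text = "\nPrevious conversation:\n" + "\n".join(parts) + "\n"
--
--     context_limit_reached = total >= MAX_CONTEXT_MESSAGES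
--     return history_text, total, context_limit_reached
-- ===== SOURCE B (Python) =====
-- MAX_CONTEXT_MESSAGES = 20
-- MAX_HISTORY_CHARS = 8000
--
--
-- def _fit(msgs, budget):
--     """Recursively consume messages while they fit in the budget; returns the
--     already-joined text of the kept prefix, or None if none fits. Stops at the
--     first message whose formatted line would exceed the remaining budget."""
--     if not msgs:
--         return None
--     m = msgs[0]
--     line = ("User" if m.get("role") == "user" else "Assistant") + ": " + m.get("content", "")
--     if len(line) > budget:
--         return None
--     rest = _fit(msgs[1:], budget - len(line))
--     return line if rest is None else line + "\n" + rest
--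
--
-- def _build_history_text(chat_history: list, max_msgs: int = None, max_chars: int = None) -> tuple[str, int, bool]:
--     total = len(chat_history)
--     if not chat_history:
--         return "", 0, False
--     n = max_msgs or MAX_CONTEXT_MESSAGES
--     budget = max_chars or MAX_HISTORY_CHARS
--     body = _fit(chat_history[-n:], budget)
--     if body is None:
--         return "", total, total >= MAX_CONTEXT_MESSAGES
--     return "\nPrevious conversation:\n" + body + "\n", total, total >= MAX_CONTEXT_MESSAGES
-- ===== Notes on version B (the rewrite author's own statement) =====
-- stated objective: alternative
-- what changed: Replaces A's iterative parts-list/char_count/included accumulation plus final join with a direct recursion on the message list carrying the remaining character budget, which builds the already-joined history string (an Option) on the way back up; no intermediate list, counter or join pass.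
import Mathlib
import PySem

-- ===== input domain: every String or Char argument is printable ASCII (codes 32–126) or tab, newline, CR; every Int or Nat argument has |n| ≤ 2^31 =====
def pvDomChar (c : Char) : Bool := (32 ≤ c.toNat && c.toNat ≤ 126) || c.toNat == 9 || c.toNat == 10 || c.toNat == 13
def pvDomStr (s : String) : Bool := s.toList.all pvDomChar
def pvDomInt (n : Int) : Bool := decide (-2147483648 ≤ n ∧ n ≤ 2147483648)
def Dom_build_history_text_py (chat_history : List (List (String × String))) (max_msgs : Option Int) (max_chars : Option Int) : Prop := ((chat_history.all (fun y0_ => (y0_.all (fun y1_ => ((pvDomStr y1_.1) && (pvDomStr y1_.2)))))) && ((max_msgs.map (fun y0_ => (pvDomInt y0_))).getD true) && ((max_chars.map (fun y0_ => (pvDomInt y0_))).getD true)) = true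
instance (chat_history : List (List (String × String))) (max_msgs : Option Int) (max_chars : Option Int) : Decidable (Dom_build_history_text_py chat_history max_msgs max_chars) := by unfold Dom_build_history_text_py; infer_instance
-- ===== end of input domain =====

-- ===== PORT A =====
-- B replaces A's parts-list/char_count loop + final join by a budget-carrying recursion
-- that builds the joined text directly (alternative decomposition).

-- A's line formatter: role/content lookup and "Role: content"
def pvLine (msg : List (String × String)) : List Char :=
  let d := PySem.Dict.ofList msg
  let role : String := if d.get? "role" = some "user" then "User" else "Assistant"
  let content : String := d.getD "content" ""
  role.toList ++ (": ").toList ++ content.toList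

-- A's loop: accumulate parts/char_count/included, break at first overflow
def pvLoopA (mc : Int) : List (List (String × String)) → Int → List (List Char) → Int → List (List Char) × Int
  | [], _, parts, included => (parts, included)
  | msg :: rest, cc, parts, included =>
    let line := pvLine msg
    if cc + (line.length : Int) > mc then (parts, included)
    else pvLoopA mc rest (cc + (line.length : Int)) (parts ++ [line]) (included + 1)

def build_history_text_py (chat_history : List (List (String × String))) (max_msgs : Option Int) (max_chars : Option Int) : String × Int × Bool :=
  if chat_history = [] then ("", 0, false) else
  let mm : Int := match max_msgs with | none => 20 | some v => if v = 0 then 20 else v   -- max_msgs or MAX_CONTEXT_MESSAGES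
  let mc : Int := match max_chars with | none => 8000 | some v => if v = 0 then 8000 else v
  let total : Int := (chat_history.length : Int)
  let recent := PySem.List.slice chat_history (some (-mm)) none
  let parts := (pvLoopA mc recent 0 [] 0).1
  let history_text : String :=
    if parts ≠ [] then
      String.ofList (("\nPrevious conversation:\n").toList ++ PySem.Chars.join ("\n").toList parts ++ ("\n").toList)
    else ""
  (history_text, total, decide (total ≥ 20))

-- ===== PORT B =====
-- B's _fit: recursion on the messages carrying the remaining budget, returning the
-- already-joined kept text (none = nothing fits); the line is formatted inline as in Source B
def pvFit : List (List (String × String)) → Int → Option (List Char)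
  | [], _ => none
  | m :: rest, budget =>
    let d := PySem.Dict.ofList m
    let line := (if d.get? "role" = some "user" then "User" else "Assistant").toList
                  ++ (": ").toList ++ (d.getD "content" "").toList
    if (line.length : Int) > budget then none
    else
      match pvFit rest (budget - (line.length : Int)) with
      | none => some line
      | some r => some (line ++ '\n' :: r)

def build_history_text_py_alt (chat_history : List (List (String × String))) (max_msgs : Option Int) (max_chars : Option Int) : String × Int × Bool :=
  let total : Int := (chat_history.length : Int)
  if chat_history = [] then ("", 0, false) else
  let n0 : Int := max_msgs.getD 0
  let n : Int := if n0 = 0 then 20 else n0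
  let b0 : Int := max_chars.getD 0
  let budget : Int := if b0 = 0 then 8000 else b0
  match pvFit (PySem.List.slice chat_history (some (-n)) none) budget with
  | none => ("", total, decide (total ≥ 20))
  | some body =>
      (String.ofList (("\nPrevious conversation:\n").toList ++ body ++ ("\n").toList),
       total, decide (total ≥ 20))

-- ===== PRECONDITION & SPEC =====
def Spec_build_history_text_py (chat_history : List (List (String × String))) (max_msgs : Option Int) (max_chars : Option Int) (out : String × Int × Bool) : Prop := out = build_history_text_py_alt chat_history max_msgs max_chars
instance (chat_history : List (List (String × String))) (max_msgs : Option Int) (max_chars : Option Int) (out : String × Int × Bool) : Decidable (Spec_build_history_text_py chat_history max_msgs max_chars out) := by unfold Spec_build_history_text_py; infer_instance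

-- ===== CLAIM (what is proved, stated in full; the proofs are below) =====
def Claim_equal_build_history_text_py : Prop := ∀ (chat_history : List (List (String × String))) (max_msgs : Option Int) (max_chars : Option Int), Dom_build_history_text_py chat_history max_msgs max_chars → Spec_build_history_text_py chat_history max_msgs max_chars (build_history_text_py chat_history max_msgs max_chars)

-- ===== LEMMAS AND PROOFS =====

-- the prefix of lines A keeps, as a function of the remaining budget
def pvParts (b : Int) : List (List (String × String)) → List (List Char)
  | [] => []
  | m :: t =>
    let line := pvLine m
    if (line.length : Int) > b then [] else line :: pvParts (b - (line.length : Int)) t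

theorem pvLoopA_parts (mc : Int) (msgs : List (List (String × String))) :
    ∀ (cc : Int) (parts : List (List Char)) (inc : Int),
    (pvLoopA mc msgs cc parts inc).1 = parts ++ pvParts (mc - cc) msgs := by
  induction msgs with
  | nil => intro cc parts inc; simp [pvLoopA, pvParts]
  | cons m t ih =>
    intro cc parts inc
    simp only [pvLoopA, pvParts]
    by_cases h : cc + ((pvLine m).length : Int) > mc
    · rw [if_pos h, if_pos (by omega)]; simp
    · rw [if_neg h, if_neg (by omega), ih]
      have heq : mc - (cc + ((pvLine m).length : Int)) = mc - cc - ((pvLine m).length : Int) := by omega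
      simp [heq]

theorem pvFit_eq_parts (msgs : List (List (String × String))) : ∀ (b : Int),
    pvFit msgs b = (if pvParts b msgs = [] then none
                    else some (PySem.Chars.join ("\n").toList (pvParts b msgs))) := by
  induction msgs with
  | nil => intro b; simp [pvFit, pvParts]
  | cons m t ih =>
    intro b
    simp only [pvFit, pvParts, pvLine]
    generalize ((if (PySem.Dict.ofList m).get? "role" = some "user" then "User" else "Assistant").toList
        ++ (": ").toList ++ ((PySem.Dict.ofList m).getD "content" "").toList) = L
    by_cases h : ((L.length : Int) > b)
    · rw [if_pos h, if_pos h]; simp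
    · rw [if_neg h, if_neg h, ih]
      by_cases hp : pvParts (b - (L.length : Int)) t = []
      · simp [hp, PySem.Chars.join_singleton]
      · rcases List.exists_cons_of_ne_nil hp with ⟨y, ys, hys⟩
        simp only [if_neg (List.cons_ne_nil _ _), hys, PySem.Chars.join_cons_cons]
        simp

-- ===== VERDICT (by name: the statement is the Claim_ definition above) =====
theorem build_history_text_py_spec : Claim_equal_build_history_text_py := by
  intro chat_history max_msgs max_chars _hdom
  unfold Spec_build_history_text_py build_history_text_py build_history_text_py_alt
  by_cases h : chat_history = []
  · simp [h]
  · cases max_msgs <;> cases max_chars <;>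
    · simp only [h, if_false, ne_eq, Option.getD_some, Option.getD_none, pvLoopA_parts,
        List.nil_append, pvFit_eq_parts, sub_zero]
      split_ifs <;> simp_all
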